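-- pv_equiv track=rewrite | github.com/hims91/project-synapse | src/axon_interface/webhooks/security.py | validate_signature_header
-- ===== SOURCE A (Python) =====
-- from typing import Dict, Optional, Tuple
--
-- def validate_signature_header(signature_header: str) -> Tuple[bool, Optional[str], Optional[str]]:
--     """
--     Parse and validate signature header format.
--
--     Args:
--         signature_header: Signature header value
--
--     Returns:
--         Tuple of (is_valid, algorithm, signature)
--     """
--     try:
--         if '=' not in signature_header:
--             return False, None, None
--
--         algorithm, signature = signature_header.split('=', 1)
--
--         # Validate algorithm
--         if algorithm not in ['sha1', 'sha256']:
--             return False, None, None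
--
--         # Validate signature format (hex)
--         if not all(c in '0123456789abcdef' for c in signature.lower()):
--             return False, None, None
--
--         # Validate signature length
--         expected_lengths = {'sha1': 40, 'sha256': 64}
--         if len(signature) != expected_lengths[algorithm]:
--             return False, None, None
--
--         return True, algorithm, signature
--
--     except Exception:
--         return False, None, None
-- ===== SOURCE B (Python) =====
-- def validate_signature_header(signature_header):
--     """Anchored pattern table: try each (algorithm, hex-length) pair directly
--     against the header instead of splitting on '=' and re-validating parts."""
--     for algo, n in (('sha1', 40), ('sha256', 64)):
--         prefix = algo + '='
--         sig = signature_header[len(prefix):]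
--         if (signature_header.startswith(prefix)
--                 and len(signature_header) == len(prefix) + n
--                 and all(c in '0123456789abcdefABCDEF' for c in sig)):
--             return True, algo, sig
--     return False, None, None
-- ===== Notes on version B (the rewrite author's own statement) =====
-- stated objective: simpler
-- what changed: B drops A's split-then-validate pipeline (split on the separator, algorithm membership test, lowercase-then-hex scan, length dict) and instead matches the whole header directly against each anchored pattern: algorithm name, separator, fixed-length hex run in either case.
import Mathlib
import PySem

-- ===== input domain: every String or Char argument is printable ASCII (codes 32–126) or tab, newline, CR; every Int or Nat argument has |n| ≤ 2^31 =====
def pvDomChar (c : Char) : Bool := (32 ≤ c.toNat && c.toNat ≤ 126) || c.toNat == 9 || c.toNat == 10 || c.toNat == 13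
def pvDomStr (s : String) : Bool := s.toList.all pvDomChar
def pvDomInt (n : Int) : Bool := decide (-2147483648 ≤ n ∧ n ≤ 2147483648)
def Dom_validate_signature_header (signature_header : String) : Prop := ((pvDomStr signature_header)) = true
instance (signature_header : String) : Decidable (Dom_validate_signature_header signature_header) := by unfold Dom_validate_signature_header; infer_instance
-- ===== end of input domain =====

-- B replaces A's split-then-validate pipeline by an anchored pattern table ("sha1="+40 hex, "sha256="+64 hex)
-- tried directly against the header (objective: simpler); return values proved equal on all strings.

-- ===== PORT A =====
-- body of A after `algorithm, signature = signature_header.split('=', 1)` (helper for the 2-element unpack)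
def pvACheck (algorithm signature : List Char) : Bool × Option String × Option String :=
  if String.ofList algorithm ∉ (["sha1", "sha256"] : List String) then (false, none, none)
  else if ¬ ((PySem.Chars.lower signature).all fun c =>
      ("0123456789abcdef".toList).contains c) then (false, none, none)
  else
    match (PySem.Dict.ofList [("sha1", 40), ("sha256", 64)] : PySem.Dict String Nat).get?
        (String.ofList algorithm) with
    | some n =>
      if signature.length ≠ n then (false, none, none)
      else (true, some (String.ofList algorithm), some (String.ofList signature))
    | none => (false, none, none)  -- KeyError, caught by A's `except Exception` (unreachable)

def validate_signature_header (signature_header : String) : Bool × Option String × Option String :=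
  let cs := signature_header.toList
  -- Python `'=' not in signature_header`: substring test with a one-char needle = char membership (exact)
  if '=' ∉ cs then (false, none, none)
  else
    -- `signature_header.split('=', 1)`
    match PySem.Chars.splitOnMax cs "=".toList 1 with
    | [algorithm, signature] => pvACheck algorithm signature
    | _ => (false, none, none)  -- tuple-unpack ValueError, caught by `except Exception` (unreachable)

-- ===== PORT B =====
def pvHexChar (c : Char) : Bool := ("0123456789abcdefABCDEF".toList).contains c

def pvAltGo (cs : List Char) : List (String × Nat) → Bool × Option String × Option String
  | [] => (false, none, none)
  | (algo, n) :: rest =>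
    let pre := algo.toList ++ ['=']          -- prefix = algo + '='
    let sig := cs.drop pre.length            -- signature_header[len(prefix):]
    if pre.isPrefixOf cs && cs.length == pre.length + n && sig.all pvHexChar then
      (true, some algo, some (String.ofList sig))
    else pvAltGo cs rest

def validate_signature_header_alt (signature_header : String) : Bool × Option String × Option String :=
  pvAltGo signature_header.toList [("sha1", 40), ("sha256", 64)]

-- ===== PRECONDITION & SPEC =====
def Spec_validate_signature_header (signature_header : String) (out : Bool × Option String × Option String) : Prop := out = validate_signature_header_alt signature_header
instance (signature_header : String) (out : Bool × Option String × Option String) : Decidable (Spec_validate_signature_header signature_header out) := by unfold Spec_validate_signature_header; infer_instance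

-- ===== CLAIM (what is proved, stated in full; the proofs are below) =====
def Claim_equal_validate_signature_header : Prop := ∀ (signature_header : String), Dom_validate_signature_header signature_header → Spec_validate_signature_header signature_header (validate_signature_header signature_header)

-- ===== LEMMAS AND PROOFS =====

-- every string with '=' in it splits as (part before the first '='), '=', rest
lemma pv_exists_split : ∀ (cs : List Char), '=' ∈ cs → ∃ a b : List Char, cs = a ++ '=' :: b ∧ '=' ∉ a
  | [], h => absurd h (by simp)
  | c :: cs, h => by
    by_cases hc : c = '='
    · exact ⟨[], cs, by simp [hc], by simp⟩
    · have htl : '=' ∈ cs := by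
        rcases List.mem_cons.mp h with h' | h'
        · exact absurd h'.symm hc
        · exact h'
      obtain ⟨a, b, heq, ha⟩ := pv_exists_split cs htl
      exact ⟨c :: a, b, by rw [heq, List.cons_append],
        by simp only [List.mem_cons, not_or]; exact ⟨fun h' => hc h'.symm, ha⟩⟩

lemma pv_go_split (a : List Char) (ha : '=' ∉ a) :
    ∀ (fuel : Nat), a.length + 1 ≤ fuel → ∀ (b cur : List Char) (acc : List (List Char)),
      PySem.Chars.splitOnMax.go ['='] fuel 1 (a ++ '=' :: b) cur acc
        = acc.reverse ++ [cur.reverse ++ a, b] := by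
  induction a with
  | nil =>
    intro fuel hf b cur acc
    obtain ⟨f, rfl⟩ : ∃ f, fuel = f + 1 := ⟨fuel - 1, by omega⟩
    rw [PySem.Chars.splitOnMax.go.eq_def]
    simp [List.isPrefixOf]
    cases f <;> cases b <;> rw [PySem.Chars.splitOnMax.go.eq_def] <;> simp
  | cons x xs ih =>
    intro fuel hf b cur acc
    obtain ⟨f, rfl⟩ : ∃ f, fuel = f + 1 := ⟨fuel - 1, by omega⟩
    have hx : x ≠ '=' := fun h => ha (by simp [h])
    rw [List.cons_append, PySem.Chars.splitOnMax.go.eq_def]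
    simp only [List.isPrefixOf]
    rw [if_neg (by omega : ¬ (1 : Nat) = 0)]
    rw [if_neg (by simp; exact fun h => absurd h.symm hx)]
    rw [ih (fun h => ha (List.mem_cons_of_mem _ h)) f (by simp at hf ⊢; omega) b (x :: cur) acc]
    simp

-- `s.split('=', 1)` on a string whose first '=' separates a and b is [a, b]
lemma pv_split_top (a b : List Char) (ha : '=' ∉ a) :
    PySem.Chars.splitOnMax (a ++ '=' :: b) "=".toList 1 = [a, b] := by
  have : "=".toList = ['='] := by decide
  rw [this, PySem.Chars.splitOnMax, if_neg (by omega),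
    show Int.toNat 1 = 1 from rfl, pv_go_split a ha _ (by simp)]
  simp

lemma pv_char_le_iff (a c : Char) : (a ≤ c) ↔ a.toNat ≤ c.toNat := by
  rw [Char.le_def, UInt32.le_iff_toNat_le]; rfl

lemma pv_char_eq_iff (a c : Char) : (a = c) ↔ a.toNat = c.toNat :=
  ⟨fun h => h ▸ rfl, fun h => Char.ofNat_toNat a ▸ Char.ofNat_toNat c ▸ congrArg Char.ofNat h⟩

lemma pv_toNat_ofNat_valid (n : Nat) (h : Nat.isValidChar n) : (Char.ofNat n).toNat = n := by
  simp only [Char.ofNat, h, dif_pos]; rfl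

-- `c.lower() in '0123456789abcdef'` is exactly B's upper-or-lower hex-digit test
lemma pv_hex_lower (c : Char) :
    ("0123456789abcdef".toList).contains (PySem.Chars.lowerChar c) = pvHexChar c := by
  have e1 : "0123456789abcdef".toList
      = ['0','1','2','3','4','5','6','7','8','9','a','b','c','d','e','f'] := by decide
  have e2 : "0123456789abcdefABCDEF".toList
      = ['0','1','2','3','4','5','6','7','8','9','a','b','c','d','e','f','A','B','C','D','E','F'] := by decide
  unfold PySem.Chars.lowerChar PySem.Chars.isupper pvHexChar
  rw [e1, e2]
  by_cases h : ('A' ≤ c ∧ c ≤ 'Z')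
  · rw [if_pos (by simp [h.1, h.2])]
    have h1 := (pv_char_le_iff _ _).mp h.1
    have h2 := (pv_char_le_iff _ _).mp h.2
    simp only [show ('A').toNat = 65 from rfl] at h1
    simp only [show ('Z').toNat = 90 from rfl] at h2
    have hv : Nat.isValidChar (c.toNat + 32) := Or.inl (by omega)
    have ht := pv_toNat_ofNat_valid (c.toNat + 32) hv
    simp only [List.contains_eq_mem, List.mem_cons, List.not_mem_nil, or_false, pv_char_eq_iff,
      ht, decide_eq_decide]
    simp only [show ('0').toNat = 48 from rfl, show ('1').toNat = 49 from rfl,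
      show ('2').toNat = 50 from rfl, show ('3').toNat = 51 from rfl,
      show ('4').toNat = 52 from rfl, show ('5').toNat = 53 from rfl,
      show ('6').toNat = 54 from rfl, show ('7').toNat = 55 from rfl,
      show ('8').toNat = 56 from rfl, show ('9').toNat = 57 from rfl,
      show ('a').toNat = 97 from rfl, show ('b').toNat = 98 from rfl,
      show ('c').toNat = 99 from rfl, show ('d').toNat = 100 from rfl,
      show ('e').toNat = 101 from rfl, show ('f').toNat = 102 from rfl,
      show ('A').toNat = 65 from rfl, show ('B').toNat = 66 from rfl,
      show ('C').toNat = 67 from rfl, show ('D').toNat = 68 from rfl,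
      show ('E').toNat = 69 from rfl, show ('F').toNat = 70 from rfl]
    omega
  · rw [if_neg (by intro hb; simp at hb; exact h ⟨hb.1, hb.2⟩)]
    have hn : ¬ (65 ≤ c.toNat ∧ c.toNat ≤ 90) := by
      intro hb
      exact h ⟨(pv_char_le_iff _ _).mpr (by simpa using hb.1),
               (pv_char_le_iff _ _).mpr (by simpa using hb.2)⟩
    simp only [List.contains_eq_mem, List.mem_cons, List.not_mem_nil, or_false, pv_char_eq_iff,
      decide_eq_decide]
    simp only [show ('0').toNat = 48 from rfl, show ('1').toNat = 49 from rfl,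
      show ('2').toNat = 50 from rfl, show ('3').toNat = 51 from rfl,
      show ('4').toNat = 52 from rfl, show ('5').toNat = 53 from rfl,
      show ('6').toNat = 54 from rfl, show ('7').toNat = 55 from rfl,
      show ('8').toNat = 56 from rfl, show ('9').toNat = 57 from rfl,
      show ('a').toNat = 97 from rfl, show ('b').toNat = 98 from rfl,
      show ('c').toNat = 99 from rfl, show ('d').toNat = 100 from rfl,
      show ('e').toNat = 101 from rfl, show ('f').toNat = 102 from rfl,
      show ('A').toNat = 65 from rfl, show ('B').toNat = 66 from rfl,
      show ('C').toNat = 67 from rfl, show ('D').toNat = 68 from rfl,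
      show ('E').toNat = 69 from rfl, show ('F').toNat = 70 from rfl]
    omega

-- `signature.lower()` all hex-digits equals B's per-char test on the raw signature
lemma pv_lower_all (sig : List Char) :
    ((PySem.Chars.lower sig).all fun c => ("0123456789abcdef".toList).contains c)
      = sig.all pvHexChar := by
  unfold PySem.Chars.lower
  rw [List.all_map]
  exact congrArg _ (funext fun c => pv_hex_lower c)

-- a prefix of shape p ++ "=" with '=' ∉ p pins down the part before the first '='
lemma pv_prefix_forces (p : List Char) (hp : '=' ∉ p) :
    ∀ (a : List Char), '=' ∉ a → ∀ b : List Char,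
      (p ++ ['=']).isPrefixOf (a ++ '=' :: b) = true → a = p := by
  induction p with
  | nil =>
    intro a ha b h
    cases a with
    | nil => rfl
    | cons x xs =>
      rw [List.nil_append, List.cons_append, List.isPrefixOf_iff_prefix,
        List.cons_prefix_cons] at h
      exact absurd h.1.symm (fun hx => ha (by simp [hx]))
  | cons q qs ih =>
    intro a ha b h
    cases a with
    | nil =>
      rw [List.nil_append, List.cons_append, List.isPrefixOf_iff_prefix,
        List.cons_prefix_cons] at h
      exact absurd h.1 (fun hq => hp (by simp [hq]))
    | cons x xs =>
      rw [List.cons_append, List.cons_append, List.isPrefixOf_iff_prefix,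
        List.cons_prefix_cons] at h
      have := ih (fun hm => hp (List.mem_cons_of_mem _ hm)) xs
        (fun hm => ha (List.mem_cons_of_mem _ hm)) b
        (by rw [List.isPrefixOf_iff_prefix]; simpa using h.2)
      rw [h.1, this]

lemma pv_prefix_has_eq (p cs : List Char) (h : (p ++ ['=']).isPrefixOf cs = true) : '=' ∈ cs :=
  (List.isPrefixOf_iff_prefix.mp h).subset (by simp)

lemma pv_string_ofList_eq_iff (l : List Char) (s : String) : String.ofList l = s ↔ l = s.toList :=
  ⟨fun h => by rw [← h, String.toList_ofList], fun h => by rw [h, String.ofList_toList]⟩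

-- ===== VERDICT (by name: the statement is the Claim_ definition above) =====
theorem validate_signature_header_spec : Claim_equal_validate_signature_header := by
  intro s _
  unfold Spec_validate_signature_header validate_signature_header validate_signature_header_alt
  by_cases hm : '=' ∈ s.toList
  · rw [if_neg (by simpa using hm)]
    obtain ⟨a, b, hcs, ha⟩ := pv_exists_split s.toList hm
    rw [hcs, pv_split_top a b ha]
    show pvACheck a b = pvAltGo (a ++ '=' :: b) [("sha1", 40), ("sha256", 64)]
    unfold pvACheck
    by_cases h1 : a = "sha1".toList
    · subst h1
      rw [if_neg (by decide)]
      rw [pv_lower_all]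
      by_cases hx : b.all pvHexChar = true
      · rw [if_neg (by simp [hx])]
        simp only [show (PySem.Dict.ofList [("sha1", 40), ("sha256", 64)] :
          PySem.Dict String Nat).get? (String.ofList "sha1".toList) = some 40 from by decide]
        by_cases hl : b.length = 40
        · rw [if_neg (by simp [hl])]
          simp only [pvAltGo]
          rw [if_pos (by simp [hx]; omega)]
          simp
        · rw [if_pos (by simp [hl])]
          simp only [pvAltGo]
          rw [if_neg (by simp; intro h; exact absurd h hl)]
          rw [if_neg (by simp)]
      · have hall : b.all pvHexChar = false := by simpa using hx
        rw [if_pos (by simp [hall])]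
        simp only [pvAltGo]
        rw [if_neg (by simp [hall])]
        rw [if_neg (by simp)]
    · by_cases h2 : a = "sha256".toList
      · subst h2
        rw [if_neg (by decide)]
        rw [pv_lower_all]
        by_cases hx : b.all pvHexChar = true
        · rw [if_neg (by simp [hx])]
          simp only [show (PySem.Dict.ofList [("sha1", 40), ("sha256", 64)] :
            PySem.Dict String Nat).get? (String.ofList "sha256".toList) = some 64 from by decide]
          by_cases hl : b.length = 64
          · rw [if_neg (by simp [hl])]
            simp only [pvAltGo]
            rw [if_neg (by simp)]
            rw [if_pos (by simp [hx]; omega)]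
            simp
          · rw [if_pos (by simp [hl])]
            simp only [pvAltGo]
            rw [if_neg (by simp)]
            rw [if_neg (by simp; intro h; exact absurd h hl)]
        · have hall : b.all pvHexChar = false := by simpa using hx
          rw [if_pos (by simp [hall])]
          simp only [pvAltGo]
          rw [if_neg (by simp)]
          rw [if_neg (by simp [hall])]
      · rw [if_pos (by
          simp only [List.mem_cons, List.not_mem_nil, or_false, not_or, pv_string_ofList_eq_iff]
          exact ⟨h1, h2⟩)]
        simp only [pvAltGo]
        rw [if_neg (by
          simp only [Bool.and_eq_true, not_and]
          intro hpf
          exact absurd (pv_prefix_forces "sha1".toList (by decide) a ha b hpf.1) h1)]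
        rw [if_neg (by
          simp only [Bool.and_eq_true, not_and]
          intro hpf
          exact absurd (pv_prefix_forces "sha256".toList (by decide) a ha b hpf.1) h2)]
  · rw [if_pos (by simpa using hm)]
    simp only [pvAltGo]
    rw [if_neg (by
      simp only [Bool.and_eq_true, not_and]
      intro hpf
      exact absurd (pv_prefix_has_eq "sha1".toList _ hpf.1) hm)]
    rw [if_neg (by
      simp only [Bool.and_eq_true, not_and]
      intro hpf
      exact absurd (pv_prefix_has_eq "sha256".toList _ hpf.1) hm)]
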